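-- pv_equiv track=rewrite | github.com/Lucent/health-data | intake/compare_extractors.py | compare_totals
-- ===== SOURCE A (Python) =====
-- def compare_totals(oxps_rows, html_rows):
--     """Compare daily TOTAL rows. Returns (matches, mismatches, missing)."""
--     oxps_totals = {r["date"]: r for r in oxps_rows if r["meal"] == "TOTAL"}
--     html_totals = {r["date"]: r for r in html_rows if r["meal"] == "TOTAL"}
--
--     matches = 0
--     mismatches = []
--     missing_from_oxps = []
--     missing_from_html = []
--
--     all_dates = sorted(set(oxps_totals.keys()) | set(html_totals.keys()))
--     for date in all_dates:
--         if date not in oxps_totals: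
--             missing_from_oxps.append(date)
--             continue
--         if date not in html_totals:
--             missing_from_html.append(date)
--             continue
--
--         o = oxps_totals[date]
--         h = html_totals[date]
--
--         # Compare calorie totals (the most reliable field)
--         match = True
--         diffs = []
--         for col in ["calories", "carbs_g", "fat_g", "protein_g",
--                      "cholest_mg", "sodium_mg", "sugars_g", "fiber_g"]:
--             ov = o.get(col, "").strip()
--             hv = h.get(col, "").strip()
--             # Treat 0 and empty as equivalent for comparison
--             # (OXPS renders -- as 0, HTML as empty)
--             if ov == "0" and hv == "":
--                 continue
--             if ov == hv:
--                 continue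
--             # Tolerate ±1 rounding (internal MFP rounding from exports at different times)
--             try:
--                 if abs(int(ov) - int(hv)) <= 1:
--                     continue
--             except (ValueError, TypeError):
--                 pass
--             match = False
--             diffs.append(f"{col}: OXPS={ov!r} HTML={hv!r}")
--
--         if match:
--             matches += 1
--         else:
--             mismatches.append((date, diffs))
--
--     return matches, mismatches, missing_from_oxps, missing_from_html
-- ===== SOURCE B (Python) =====
-- _COLUMNS = ["calories", "carbs_g", "fat_g", "protein_g",
--             "cholest_mg", "sodium_mg", "sugars_g", "fiber_g"]
--
--
-- def _close(ov, hv):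
--     try:
--         return abs(int(ov) - int(hv)) <= 1
--     except ValueError:
--         return False
--
--
-- def _row_diffs(o, h):
--     return [f"{col}: OXPS={ov!r} HTML={hv!r}"
--             for col in _COLUMNS
--             for ov, hv in [(o.get(col, "").strip(), h.get(col, "").strip())]
--             if not ((ov == "0" and hv == "") or ov == hv or _close(ov, hv))]
--
--
-- def _latest_totals(rows):
--     """(date, row) pairs of TOTAL rows, last occurrence per date, sorted by date.
--
--     Scans the rows backwards keeping the first (date, row) seen per date,
--     then sorts the distinct dates."""
--     seen = set()
--     items = []
--     for r in reversed(rows):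
--         if r["meal"] == "TOTAL":
--             d = r["date"]
--             if d not in seen:
--                 seen.add(d)
--                 items.append((d, r))
--     items.sort(key=lambda t: t[0])
--     return items
--
--
-- def compare_totals(oxps_rows, html_rows):
--     """Compare daily TOTAL rows. Returns (matches, mismatches, missing)."""
--     o_items = _latest_totals(oxps_rows)
--     h_items = _latest_totals(html_rows)
--
--     matches = 0
--     mismatches = []
--     missing_from_oxps = []
--     missing_from_html = []
--
--     i = j = 0
--     while i < len(o_items) and j < len(h_items):
--         od, o = o_items[i]
--         hd, h = h_items[j]
--         if od < hd:
--             missing_from_html.append(od)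
--             i += 1
--         elif hd < od:
--             missing_from_oxps.append(hd)
--             j += 1
--         else:
--             diffs = _row_diffs(o, h)
--             if diffs:
--                 mismatches.append((od, diffs))
--             else:
--                 matches += 1
--             i += 1
--             j += 1
--     missing_from_html.extend(d for d, _ in o_items[i:])
--     missing_from_oxps.extend(d for d, _ in h_items[j:])
--
--     return matches, mismatches, missing_from_oxps, missing_from_html
-- ===== Notes on version B (the rewrite author's own statement) =====
-- stated objective: alternative
-- what changed: B replaces A's date-keyed dicts and sorted key union by sort-then-merge: each side's TOTAL rows are reduced to (date,row) pairs (last occurrence per date, via a backwards scan) and sorted, then a single two-pointer merge of the two sorted lists classifies every date as missing-from-oxps, missing-from-html or common (where the per-column fuzzy comparison runs), with no dict and no membership test in the main loop.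
import Mathlib
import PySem

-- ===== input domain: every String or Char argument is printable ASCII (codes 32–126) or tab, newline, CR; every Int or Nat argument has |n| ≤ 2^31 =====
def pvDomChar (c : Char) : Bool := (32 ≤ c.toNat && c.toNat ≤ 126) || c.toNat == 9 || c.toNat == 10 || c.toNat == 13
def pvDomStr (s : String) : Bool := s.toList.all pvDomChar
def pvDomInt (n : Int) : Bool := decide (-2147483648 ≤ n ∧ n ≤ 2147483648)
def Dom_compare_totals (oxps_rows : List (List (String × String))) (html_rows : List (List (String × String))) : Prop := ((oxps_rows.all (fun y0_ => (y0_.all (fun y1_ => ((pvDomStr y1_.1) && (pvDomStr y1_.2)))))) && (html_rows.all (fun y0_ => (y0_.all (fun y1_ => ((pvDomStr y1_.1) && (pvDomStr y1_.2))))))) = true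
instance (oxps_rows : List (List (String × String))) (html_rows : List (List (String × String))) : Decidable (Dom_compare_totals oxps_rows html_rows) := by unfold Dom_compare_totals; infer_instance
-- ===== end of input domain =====

-- B replaces A's date-keyed dicts and sorted key union by sort-then-merge: it sorts the (date, row)
-- pairs of each side (last TOTAL row per date) and walks both sorted lists once with two pointers,
-- with no dict or membership test.  Objective: alternative (same O(n log n) cost).

-- ----- shared low-level helpers (identical Python text in both sources: .get/.strip and the f-string with !r) -----

-- exact port of Python str repr escaping for the Dom alphabet (printable ASCII plus tab/newline/CR); \xNN escapes for
-- other control characters are never needed inside Dom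
def pyReprChars (cs : List Char) (q : Char) : List Char :=
  cs.flatMap (fun c =>
    if c = '\\' then ['\\', '\\']
    else if c = q then ['\\', q]
    else if c = '\t' then ['\\', 't']
    else if c = '\n' then ['\\', 'n']
    else if c = '\r' then ['\\', 'r']
    else [c])

-- Python repr(s): double quotes iff s contains ' and not "
def pyRepr (s : String) : String :=
  let cs := s.toList
  let q : Char := if cs.contains '\'' && !cs.contains '"' then '"' else '\''
  String.mk ((q :: pyReprChars cs q) ++ [q])

-- f"{col}: OXPS={ov!r} HTML={hv!r}"
def diffMsg (col ov hv : String) : String :=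
  String.mk (col.toList ++ ": OXPS=".toList ++ (pyRepr ov).toList ++ " HTML=".toList ++ (pyRepr hv).toList)

def colList : List String :=
  ["calories", "carbs_g", "fat_g", "protein_g", "cholest_mg", "sodium_mg", "sugars_g", "fiber_g"]

-- r.get(col, "") on a row (a Python dict, modelled as an association list: first match)
def rowGet (r : List (String × String)) (k : String) : String :=
  (List.lookup k r).getD ""

-- ===== PORT A =====
-- {r["date"]: r for r in rows if r["meal"] == "TOTAL"}  (r["meal"]/r["date"]: Pre_ guarantees the keys are present,
-- so the getD "" defaults are never taken where Python would raise KeyError)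
def totalsOf (rows : List (List (String × String))) : PySem.Dict String (List (String × String)) :=
  rows.foldl (fun d r =>
    if (List.lookup "meal" r).getD "" == "TOTAL" then d.insert ((List.lookup "date" r).getD "") r else d)
    PySem.Dict.empty

def compare_totals (oxps_rows : List (List (String × String))) (html_rows : List (List (String × String))) : Int × (List (String × List String)) × List String × List String :=
  let oxps_totals := totalsOf oxps_rows
  let html_totals := totalsOf html_rows
  let all_dates := PySem.List.sorted
    (PySem.Set.union (PySem.Set.ofList oxps_totals.keys) html_totals.keys) (fun x => x) false
  all_dates.foldl (fun st date =>
    if !(oxps_totals.contains date) then (st.1, st.2.1, st.2.2.1 ++ [date], st.2.2.2)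
    else if !(html_totals.contains date) then (st.1, st.2.1, st.2.2.1, st.2.2.2 ++ [date])
    else
      let o := oxps_totals.getD date []
      let h := html_totals.getD date []
      let md := colList.foldl (fun (st2 : Bool × List String) col =>
        let ov := PySem.Str.strip (rowGet o col)
        let hv := PySem.Str.strip (rowGet h col)
        if ov == "0" && hv == "" then st2
        else if ov == hv then st2
        else
          match PySem.Int.ofStr? ov, PySem.Int.ofStr? hv with
          | some a, some b =>
              if |a - b| ≤ 1 then st2 else (false, st2.2 ++ [diffMsg col ov hv])
          | _, _ => (false, st2.2 ++ [diffMsg col ov hv]))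
        (true, ([] : List String))
      if md.1 then (st.1 + 1, st.2.1, st.2.2.1, st.2.2.2)
      else (st.1, st.2.1 ++ [(date, md.2)], st.2.2.1, st.2.2.2))
    ((0 : Int), ([] : List (String × List String)), ([] : List String), ([] : List String))

-- ===== PORT B =====
-- _close(ov, hv): int() raising ValueError is PySem.Int.ofStr? = none
def valuesClose (ov hv : String) : Bool :=
  match PySem.Int.ofStr? ov with
  | none => false
  | some a =>
    match PySem.Int.ofStr? hv with
    | none => false
    | some b => decide (|a - b| ≤ 1)

-- _row_diffs(o, h): the comprehension with its filter clause
def rowDiffs (o h : List (String × String)) : List String :=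
  colList.filterMap (fun col =>
    let ov := PySem.Str.strip (rowGet o col)
    let hv := PySem.Str.strip (rowGet h col)
    if (ov == "0" && hv == "") || ov == hv || valuesClose ov hv then none
    else some (diffMsg col ov hv))

-- _latest_totals(rows): backwards scan keeping the first (date, row) per date, then sort by date
def latestTotals (rows : List (List (String × String))) : List (String × List (String × String)) :=
  let items := (rows.reverse.foldl
    (fun (st : PySem.Set String × List (String × List (String × String))) r =>
      if (List.lookup "meal" r).getD "" == "TOTAL" then
        let d := (List.lookup "date" r).getD ""
        if PySem.Set.contains st.1 d then st else (PySem.Set.add st.1 d, st.2 ++ [(d, r)])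
      else st)
    (PySem.Set.empty, [])).2
  PySem.List.sorted items (fun t => t.1) false

-- the while loop over the two index pointers, as recursion on the two sorted lists; the trailing
-- extends of the remainders are the base cases
def mergeLoop (os hs : List (String × List (String × String)))
    (m : Int) (ms : List (String × List String)) (mo mh : List String) :
    Int × (List (String × List String)) × List String × List String :=
  match os, hs with
  | [], rest => (m, ms, mo ++ rest.map Prod.fst, mh)
  | o :: os', [] => (m, ms, mo, mh ++ ((o :: os').map Prod.fst))
  | (od, o) :: os', (hd, h) :: hs' =>
    if od < hd then mergeLoop os' ((hd, h) :: hs') m ms mo (mh ++ [od])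
    else if hd < od then mergeLoop ((od, o) :: os') hs' m ms (mo ++ [hd]) mh
    else
      let diffs := rowDiffs o h
      if diffs.isEmpty then mergeLoop os' hs' (m + 1) ms mo mh
      else mergeLoop os' hs' m (ms ++ [(od, diffs)]) mo mh
termination_by os.length + hs.length

def compare_totals_alt (oxps_rows : List (List (String × String))) (html_rows : List (List (String × String))) : Int × (List (String × List String)) × List String × List String :=
  mergeLoop (latestTotals oxps_rows) (latestTotals html_rows) 0 [] [] []

-- ===== PRECONDITION & SPEC =====
-- Pre_ excludes (a) rows without a "meal" key, and rows with meal "TOTAL" but no "date" key, on which A raises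
-- KeyError, and (b) rows whose association list carries a duplicate key, which no Python dict argument can have
-- (the assoc-list convention's first-match lookup makes them ambiguous).
def Pre_compare_totals (oxps_rows : List (List (String × String))) (html_rows : List (List (String × String))) : Prop :=
  ∀ r ∈ oxps_rows ++ html_rows,
    (r.map Prod.fst).Nodup ∧ (List.lookup "meal" r).isSome = true ∧
    (List.lookup "meal" r = some "TOTAL" → (List.lookup "date" r).isSome = true)
instance (oxps_rows : List (List (String × String))) (html_rows : List (List (String × String))) : Decidable (Pre_compare_totals oxps_rows html_rows) := by unfold Pre_compare_totals; infer_instance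
def pvWitness_compare_totals : (List (List (String × String))) × (List (List (String × String))) :=
  ([[("meal", "TOTAL"), ("date", "2024-01-01"), ("calories", "100")]],
   [[("meal", "TOTAL"), ("date", "2024-01-01"), ("calories", "101")]])

def Spec_compare_totals (oxps_rows : List (List (String × String))) (html_rows : List (List (String × String))) (out : Int × (List (String × List String)) × List String × List String) : Prop := out = compare_totals_alt oxps_rows html_rows
instance (oxps_rows : List (List (String × String))) (html_rows : List (List (String × String))) (out : Int × (List (String × List String)) × List String × List String) : Decidable (Spec_compare_totals oxps_rows html_rows out) := by unfold Spec_compare_totals; infer_instance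

-- ===== CLAIM (what is proved, stated in full; the proofs are below) =====
def Claim_equal_compare_totals : Prop := ∀ (oxps_rows : List (List (String × String))) (html_rows : List (List (String × String))), Dom_compare_totals oxps_rows html_rows → Pre_compare_totals oxps_rows html_rows → Spec_compare_totals oxps_rows html_rows (compare_totals oxps_rows html_rows)

-- ===== LEMMAS AND PROOFS =====

-- column-level outcome of the shared fuzzy comparison, used to characterise both inner loops
def okCol (o h : List (String × String)) (col : String) : Bool :=
  let ov := PySem.Str.strip (rowGet o col)
  let hv := PySem.Str.strip (rowGet h col)
  (ov == "0" && hv == "") || ov == hv || valuesClose ov hv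

def msgOf (o h : List (String × String)) (col : String) : String :=
  diffMsg col (PySem.Str.strip (rowGet o col)) (PySem.Str.strip (rowGet h col))

def dspec (o h : List (String × String)) (cs : List String) : List String :=
  (cs.filter (fun c => !okCol o h c)).map (msgOf o h)

def isCommon (O H : PySem.Dict String (List (String × String))) (d : String) : Bool :=
  O.contains d && H.contains d

def isMatch (O H : PySem.Dict String (List (String × String))) (d : String) : Bool :=
  (dspec (O.getD d []) (H.getD d []) colList).isEmpty

def entryOf (O H : PySem.Dict String (List (String × String))) (d : String) :
    Option (String × List String) :=
  if (dspec (O.getD d []) (H.getD d []) colList).isEmpty then none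
  else some (d, dspec (O.getD d []) (H.getD d []) colList)

-- ---- the two per-row comparisons compute dspec ----

lemma step_inner (o h : List (String × String)) (st2 : Bool × List String) (col : String) :
    (let ov := PySem.Str.strip (rowGet o col)
     let hv := PySem.Str.strip (rowGet h col)
     if ov == "0" && hv == "" then st2
     else if ov == hv then st2
     else
       match PySem.Int.ofStr? ov, PySem.Int.ofStr? hv with
       | some a, some b => if |a - b| ≤ 1 then st2 else (false, st2.2 ++ [diffMsg col ov hv])
       | _, _ => (false, st2.2 ++ [diffMsg col ov hv]))
    = if okCol o h col then st2 else (false, st2.2 ++ [msgOf o h col]) := by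
  unfold okCol msgOf valuesClose
  show (if _ then st2 else _) = _
  generalize PySem.Str.strip (rowGet o col) = ov
  generalize PySem.Str.strip (rowGet h col) = hv
  cases h1 : (ov == "0" && hv == "") <;> cases h2 : (ov == hv) <;>
      simp only [h1, h2, Bool.false_eq_true, if_true, if_false, Bool.false_or, Bool.true_or,
        Bool.or_true, Bool.or_false] <;> try rfl
  all_goals (rcases ha : PySem.Int.ofStr? ov with _ | a <;> rcases hb : PySem.Int.ofStr? hv with _ | b <;>
    simp only [ha, hb]) <;> try rfl
  split_ifs with h3 h4 <;> first | rfl | omega | (exfalso; simp_all <;> omega)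

lemma dspec_cons (o h : List (String × String)) (c : String) (cs : List String) :
    dspec o h (c :: cs) = if okCol o h c then dspec o h cs else msgOf o h c :: dspec o h cs := by
  cases hc : okCol o h c <;> simp [dspec, List.filter_cons, hc]

lemma innerA (o h : List (String × String)) :
    ∀ (cs : List String) (b : Bool) (acc : List String),
    cs.foldl (fun (st2 : Bool × List String) col =>
      let ov := PySem.Str.strip (rowGet o col)
      let hv := PySem.Str.strip (rowGet h col)
      if ov == "0" && hv == "" then st2
      else if ov == hv then st2
      else
        match PySem.Int.ofStr? ov, PySem.Int.ofStr? hv with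
        | some a, some b => if |a - b| ≤ 1 then st2 else (false, st2.2 ++ [diffMsg col ov hv])
        | _, _ => (false, st2.2 ++ [diffMsg col ov hv])) (b, acc)
    = (b && (dspec o h cs).isEmpty, acc ++ dspec o h cs) := by
  intro cs
  induction cs with
  | nil => intro b acc; simp [dspec]
  | cons c cs ih =>
    intro b acc
    cases hc : okCol o h c
    · rw [List.foldl_cons, step_inner o h (b, acc) c, dspec_cons, hc]
      simp only [Bool.false_eq_true, if_false]
      rw [ih]
      simp
    · rw [List.foldl_cons, step_inner o h (b, acc) c, dspec_cons, hc]
      simp only [if_true]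
      exact ih b acc

lemma filterMap_okCol (o h : List (String × String)) (cs : List String) :
    cs.filterMap (fun col => if okCol o h col then none else some (msgOf o h col))
      = dspec o h cs := by
  induction cs with
  | nil => rfl
  | cons c cs ih =>
    rw [List.filterMap_cons, dspec_cons]
    cases hc : okCol o h c <;> simp [hc, ih]

lemma rowDiffs_eq (o h : List (String × String)) : rowDiffs o h = dspec o h colList := by
  rw [← filterMap_okCol o h colList]
  rfl

-- ---- characterisation of A's outer fold (unchanged from the direct scan) ----

lemma outerA (O H : PySem.Dict String (List (String × String))) :
    ∀ (l : List String) (m : Int) (ms : List (String × List String)) (mo mh : List String),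
    l.foldl (fun st date =>
      if !(O.contains date) then (st.1, st.2.1, st.2.2.1 ++ [date], st.2.2.2)
      else if !(H.contains date) then (st.1, st.2.1, st.2.2.1, st.2.2.2 ++ [date])
      else
        let o := O.getD date []
        let h := H.getD date []
        let md := colList.foldl (fun (st2 : Bool × List String) col =>
          let ov := PySem.Str.strip (rowGet o col)
          let hv := PySem.Str.strip (rowGet h col)
          if ov == "0" && hv == "" then st2
          else if ov == hv then st2
          else
            match PySem.Int.ofStr? ov, PySem.Int.ofStr? hv with
            | some a, some b => if |a - b| ≤ 1 then st2 else (false, st2.2 ++ [diffMsg col ov hv])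
            | _, _ => (false, st2.2 ++ [diffMsg col ov hv]))
          (true, ([] : List String))
        if md.1 then (st.1 + 1, st.2.1, st.2.2.1, st.2.2.2)
        else (st.1, st.2.1 ++ [(date, md.2)], st.2.2.1, st.2.2.2)) (m, ms, mo, mh)
    = (m + (((l.filter (isCommon O H)).countP (isMatch O H) : Nat) : Int),
       ms ++ (l.filter (isCommon O H)).filterMap (entryOf O H),
       mo ++ l.filter (fun d => !O.contains d),
       mh ++ l.filter (fun d => O.contains d && !H.contains d)) := by
  intro l
  induction l with
  | nil => intro m ms mo mh; simp
  | cons d l ih =>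
    intro m ms mo mh
    simp only [List.foldl_cons]
    cases hco : O.contains d
    · simp only [hco, Bool.not_false, if_true, ih]
      simp [List.filter_cons, List.countP_cons, isCommon, hco, List.append_assoc]
    · cases hch : H.contains d
      · simp only [hco, hch, Bool.not_true, Bool.not_false, Bool.false_eq_true, if_false, if_true, ih]
        simp [List.filter_cons, List.countP_cons, isCommon, hco, hch, List.append_assoc]
      · simp only [hco, hch, Bool.not_true, Bool.false_eq_true, if_false]
        rw [innerA (O.getD d []) (H.getD d []) colList true []]
        simp only [Bool.true_and, List.nil_append]
        cases hm : (dspec (O.getD d []) (H.getD d []) colList).isEmpty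
        · simp only [Bool.false_eq_true, if_false, ih]
          have hent : entryOf O H d = some (d, dspec (O.getD d []) (H.getD d []) colList) := by
            unfold entryOf; rw [hm]; simp
          simp [List.filter_cons, List.countP_cons, isCommon, isMatch, hco, hch, hm, hent,
            List.append_assoc]
        · simp only [if_true, ih]
          have hent : entryOf O H d = none := by
            unfold entryOf; rw [hm]; simp
          have hma : isMatch O H d = true := hm
          simp [List.filter_cons, List.countP_cons, isCommon, hco, hch, hma, hent,
            List.append_assoc]
          push_cast
          ring

-- ---- sorted-list toolbox ----

lemma sorted_nodup_pairwise_lt (xs : List String) (h : xs.Nodup) :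
    (PySem.List.sorted xs (fun x => x) false).Pairwise (· < ·) := by
  have hp := PySem.List.sorted_pairwise (xs := xs) (key := fun x => x)
  have hn : (PySem.List.sorted xs (fun x => x) false).Nodup :=
    (PySem.List.sorted_perm xs (fun x => x) false).nodup_iff.mpr h
  exact (hp.and hn).imp (fun hab => lt_of_le_of_ne hab.1 hab.2)

lemma filter_sorted_eq (p : String → Bool) (U S : List String) (hU : U.Nodup) (hS : S.Nodup)
    (hmem : ∀ d, d ∈ S ↔ (p d = true ∧ d ∈ U)) :
    (PySem.List.sorted U (fun x => x) false).filter p = PySem.List.sorted S (fun x => x) false := by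
  refine (PySem.List.sorted_eq_of_perm_of_pairwise_lt S _ (fun x => x) ?_ ?_).symm
  · refine (List.perm_ext_iff_of_nodup ?_ hS).mpr ?_
    · exact ((PySem.List.sorted_perm U (fun x => x) false).nodup_iff.mpr hU).filter p
    · intro d
      simp [List.mem_filter, PySem.List.mem_sorted, hmem, and_comm]
  · exact (sorted_nodup_pairwise_lt U hU).filter p

lemma keys_totalsOf_nodup (rows : List (List (String × String))) :
    (totalsOf rows).keys.Nodup := by
  unfold totalsOf
  rw [PySem.List.foldl_if_eq_foldl_filter]
  exact PySem.Dict.nodup_keys_foldl_insert_key _ _ _ _ PySem.Dict.nodup_keys_empty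

lemma contains_eq_false_iff (O : PySem.Dict String (List (String × String))) (d : String) :
    O.contains d = false ↔ d ∉ O.keys := by
  rw [← PySem.Dict.contains_iff_mem_keys]
  cases O.contains d <;> simp

-- ---- latestTotals computes the sorted items of the dict ----

-- the first TOTAL row of l with the given date (= the last one of l.reverse)
def firstHit (l : List (List (String × String))) (d : String) : Option (List (String × String)) :=
  l.find? (fun r => (List.lookup "meal" r).getD "" == "TOTAL" && (List.lookup "date" r).getD "" == d)

lemma foldl_last_eq_find_reverse (l : List (List (String × String)))
    (p : List (String × String) → Bool) :
    ∀ (acc : Option (List (String × String))),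
    l.foldl (fun a r => if p r then some r else a) acc
      = ((l.reverse.find? p).or acc) := by
  induction l with
  | nil => intro acc; simp
  | cons r t ih =>
    intro acc
    rw [List.foldl_cons, ih, List.reverse_cons, List.find?_append]
    rcases ht : t.reverse.find? p with _ | x
    · cases hr : p r <;> simp [List.find?_cons, hr]
    · simp

lemma get?_totalsOf_aux (l : List (List (String × String))) (d : String) :
    ∀ (D : PySem.Dict String (List (String × String))),
    (l.foldl (fun d' r =>
      if (List.lookup "meal" r).getD "" == "TOTAL" then d'.insert ((List.lookup "date" r).getD "") r else d')
      D).get? d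
    = l.foldl (fun a r =>
        if ((List.lookup "meal" r).getD "" == "TOTAL" && (List.lookup "date" r).getD "" == d)
        then some r else a) (D.get? d) := by
  induction l with
  | nil => intro D; rfl
  | cons r t ih =>
    intro D
    rw [List.foldl_cons, ih, List.foldl_cons]
    congr 1
    cases hm : ((List.lookup "meal" r).getD "" == "TOTAL")
    · simp [hm]
    · simp only [hm, if_true, Bool.true_and]
      rw [PySem.Dict.get?_insert]
      cases hd : ((List.lookup "date" r).getD "" == d)
      · have hne : d ≠ (List.lookup "date" r).getD "" := fun he => by simp [he] at hd
        rw [if_neg hne]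
        simp
      · have he : (List.lookup "date" r).getD "" = d := by simpa using hd
        rw [if_pos he.symm]
        simp

lemma get?_totalsOf (rows : List (List (String × String))) (d : String) :
    (totalsOf rows).get? d = firstHit rows.reverse d := by
  unfold totalsOf firstHit
  rw [get?_totalsOf_aux, PySem.Dict.get?_empty, foldl_last_eq_find_reverse, Option.or_none]

-- the body of the backwards scan of _latest_totals, named for the proofs (definitionally the
-- lambda inside latestTotals)
def collectStep (st : PySem.Set String × List (String × List (String × String)))
    (r : List (String × String)) : PySem.Set String × List (String × List (String × String)) :=
  if (List.lookup "meal" r).getD "" == "TOTAL" then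
    let d := (List.lookup "date" r).getD ""
    if PySem.Set.contains st.1 d then st else (PySem.Set.add st.1 d, st.2 ++ [(d, r)])
  else st

lemma collect_inv (l : List (List (String × String))) :
    ∀ (s : PySem.Set String) (its : List (String × List (String × String))),
    (∀ d, PySem.Set.contains s d = true ↔ d ∈ its.map Prod.fst) →
    (its.map Prod.fst).Nodup →
    (((l.foldl collectStep (s, its)).2.map Prod.fst).Nodup ∧
     ∀ d r, (d, r) ∈ (l.foldl collectStep (s, its)).2 ↔
       ((d, r) ∈ its ∨ (d ∉ its.map Prod.fst ∧ firstHit l d = some r))) := by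
  induction l with
  | nil =>
    intro s its hseen hnd
    refine ⟨hnd, fun d r => ?_⟩
    simp [firstHit]
  | cons r t ih =>
    intro s its hseen hnd
    simp only [List.foldl_cons]
    cases hm : ((List.lookup "meal" r).getD "" == "TOTAL")
    · have hstep : collectStep (s, its) r = (s, its) := by
        simp [collectStep, hm]
      rw [hstep]
      obtain ⟨h1, h2⟩ := ih s its hseen hnd
      refine ⟨h1, fun d r' => ?_⟩
      rw [h2 d r']
      have hfh : firstHit (r :: t) d = firstHit t d := by
        unfold firstHit
        rw [List.find?_cons_of_neg]
        simp [hm]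
      rw [hfh]
    · set d0 := (List.lookup "date" r).getD "" with hd0
      have hfh : ∀ d, firstHit (r :: t) d
          = if d0 == d then some r else firstHit t d := by
        intro d
        unfold firstHit
        cases hdd : (d0 == d)
        · rw [List.find?_cons_of_neg]
          · simp
          · have hdd' : ((List.lookup "date" r).getD "" == d) = false := hd0 ▸ hdd
            simp [hm, hdd']
        · rw [List.find?_cons_of_pos]
          · simp
          · have hdd' : ((List.lookup "date" r).getD "" == d) = true := hd0 ▸ hdd
            simp [hm, hdd']
      cases hc : PySem.Set.contains s d0
      · -- d0 not yet seen: the pair (d0, r) is appended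
        have hns : d0 ∉ s := fun h => by
          rw [(PySem.Set.contains_iff s d0).mpr h] at hc
          cases hc
        have hd0mem : d0 ∉ its.map Prod.fst := fun hmem => by
          rw [← hseen d0] at hmem
          rw [hmem] at hc
          cases hc
        have hstep : collectStep (s, its) r = (PySem.Set.add s d0, its ++ [(d0, r)]) := by
          simp [collectStep, hm, ← hd0, hns]
        rw [hstep]
        have hseen' : ∀ d, PySem.Set.contains (PySem.Set.add s d0) d = true ↔
            d ∈ (its ++ [(d0, r)]).map Prod.fst := by
          intro d
          rw [PySem.Set.contains_iff, PySem.Set.mem_add, ← PySem.Set.contains_iff s d, hseen d]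
          simp
        have hnd' : ((its ++ [(d0, r)]).map Prod.fst).Nodup := by
          rw [List.map_append, List.map_cons, List.map_nil, List.nodup_append]
          refine ⟨hnd, List.nodup_singleton _, ?_⟩
          intro a ha b hb
          simp only [List.mem_singleton] at hb
          subst hb
          exact fun he => hd0mem (he ▸ ha)
        obtain ⟨h1, h2⟩ := ih (PySem.Set.add s d0) (its ++ [(d0, r)]) hseen' hnd'
        refine ⟨h1, fun d r' => ?_⟩
        rw [h2 d r', hfh d]
        have hni : ∀ x, (d0, x) ∉ its := fun x hmem =>
          hd0mem (List.mem_map_of_mem (f := Prod.fst) hmem)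
        by_cases hdd : d = d0
        · subst hdd
          rw [show (d0 == d0) = true by simp]
          simp only [if_true]
          constructor
          · rintro (h | ⟨hnm, hh⟩)
            · rcases List.mem_append.mp h with h' | h'
              · exact absurd h' (hni r')
              · have : r' = r := by
                  simpa using h'
                exact Or.inr ⟨hd0mem, by rw [this]⟩
            · exact absurd (by simp : d0 ∈ (its ++ [(d0, r)]).map Prod.fst) hnm
          · rintro (h | ⟨-, hh⟩)
            · exact absurd h (hni r')
            · have : r = r' := by injection hh
              exact Or.inl (List.mem_append.mpr (Or.inr (by simp [this])))
        · have hbe : (d0 == d) = false := by simp [Ne.symm hdd]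
          rw [hbe]
          simp only [Bool.false_eq_true, if_false]
          have hpair : (d, r') ∈ its ++ [(d0, r)] ↔ (d, r') ∈ its := by
            simp [List.mem_append, hdd]
          have hmap : d ∈ (its ++ [(d0, r)]).map Prod.fst ↔ d ∈ its.map Prod.fst := by
            simp [hdd]
          rw [hpair, hmap]
      · -- d0 already seen: the row is skipped
        have hins : d0 ∈ s := (PySem.Set.contains_iff s d0).mp hc
        have hd0mem : d0 ∈ its.map Prod.fst := (hseen d0).mp hc
        have hstep : collectStep (s, its) r = (s, its) := by
          simp [collectStep, hm, ← hd0, hins]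
        rw [hstep]
        obtain ⟨h1, h2⟩ := ih s its hseen hnd
        refine ⟨h1, fun d r' => ?_⟩
        rw [h2 d r', hfh d]
        by_cases hdd : d = d0
        · subst hdd
          rw [show (d0 == d0) = true by simp]
          simp [hd0mem]
        · have hbe : (d0 == d) = false := by simp [Ne.symm hdd]
          rw [hbe]
          simp

lemma get?_totalsOf_iff (rows : List (List (String × String))) (d : String)
    (r : List (String × String)) :
    (totalsOf rows).get? d = some r ↔ (d ∈ (totalsOf rows).keys ∧ r = (totalsOf rows).getD d []) := by
  constructor
  · intro h
    refine ⟨?_, ?_⟩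
    · by_contra hmem
      rw [← PySem.Dict.get?_eq_none_iff_not_mem_keys] at hmem
      rw [hmem] at h
      exact absurd h (by simp)
    · rw [PySem.Dict.getD_eq_get?_getD, h]
      rfl
  · rintro ⟨hk, hr⟩
    rcases hx : (totalsOf rows).get? d with _ | x
    · rw [PySem.Dict.get?_eq_none_iff_not_mem_keys] at hx
      exact absurd hk hx
    · rw [PySem.Dict.getD_eq_get?_getD, hx] at hr
      simp [hr]

lemma latestTotals_eq (rows : List (List (String × String))) :
    latestTotals rows
      = (PySem.List.sorted (totalsOf rows).keys (fun x => x) false).map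
          (fun d => (d, (totalsOf rows).getD d [])) := by
  obtain ⟨h1, h2⟩ := collect_inv rows.reverse PySem.Set.empty []
    (by intro d; simp [PySem.Set.empty, PySem.Set.contains]) (by simp)
  show PySem.List.sorted ((rows.reverse.foldl collectStep (PySem.Set.empty, [])).2)
      (fun t => t.1) false = _
  set C := (rows.reverse.foldl collectStep (PySem.Set.empty, [])).2 with hC
  have hkeys := keys_totalsOf_nodup rows
  have hmemC : ∀ d r, (d, r) ∈ C ↔ (totalsOf rows).get? d = some r := by
    intro d r
    rw [h2 d r, get?_totalsOf]
    simp
  refine PySem.List.sorted_eq_of_perm_of_pairwise_lt C _ (fun t => t.1) ?_ ?_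
  · refine (List.perm_ext_iff_of_nodup ?_ (List.Nodup.of_map Prod.fst h1)).mpr ?_
    · refine List.Nodup.of_map Prod.fst ?_
      rw [List.map_map]
      have : (fun t : String × List (String × String) => t.1) ∘
          (fun d => (d, (totalsOf rows).getD d [])) = id := rfl
      rw [show (Prod.fst ∘ fun d => (d, (totalsOf rows).getD d [])) = id from rfl, List.map_id]
      exact (PySem.List.sorted_perm _ (fun x => x) false).nodup_iff.mpr hkeys
    · rintro ⟨d, r⟩
      rw [hmemC d r, get?_totalsOf_iff]
      simp only [List.mem_map, PySem.List.mem_sorted]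
      constructor
      · rintro ⟨a, ha, heq⟩
        obtain ⟨rfl, rfl⟩ := Prod.mk.injEq .. ▸ And.intro (congrArg Prod.fst heq) (congrArg Prod.snd heq)
        exact ⟨ha, rfl⟩
      · rintro ⟨hk, rfl⟩
        exact ⟨d, hk, rfl⟩
  · rw [List.pairwise_map]
    exact sorted_nodup_pairwise_lt _ hkeys

-- ---- the merge over two strictly sorted key lists ----

lemma merge_spec_aux (f g : String → List (String × String)) :
    ∀ (n : Nat) (ks1 ks2 : List String), ks1.length + ks2.length ≤ n →
    ks1.Pairwise (· < ·) → ks2.Pairwise (· < ·) →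
    ∀ (m : Int) (ms : List (String × List String)) (mo mh : List String),
    mergeLoop (ks1.map (fun d => (d, f d))) (ks2.map (fun d => (d, g d))) m ms mo mh =
      (m + (((ks1.filter (fun d => ks2.contains d)).countP
              (fun d => (rowDiffs (f d) (g d)).isEmpty) : Nat) : Int),
       ms ++ (ks1.filter (fun d => ks2.contains d)).filterMap
              (fun d => if (rowDiffs (f d) (g d)).isEmpty then none
                        else some (d, rowDiffs (f d) (g d))),
       mo ++ ks2.filter (fun d => !ks1.contains d),
       mh ++ ks1.filter (fun d => !ks2.contains d)) := by
  intro n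
  induction n with
  | zero =>
    intro ks1 ks2 hlen h1 h2 m ms mo mh
    have e1 : ks1 = [] := List.length_eq_zero_iff.mp (by omega)
    have e2 : ks2 = [] := List.length_eq_zero_iff.mp (by omega)
    subst e1; subst e2
    simp [mergeLoop]
  | succ n ihn =>
    intro ks1 ks2 hlen h1 h2 m ms mo mh
    cases ks1 with
    | nil =>
      simp [mergeLoop, List.map_map, Function.comp_def]
    | cons d1 t1 =>
      cases ks2 with
      | nil =>
        simp [mergeLoop, List.map_map, Function.comp_def]
      | cons d2 t2 =>
        obtain ⟨hd1, ht1⟩ := List.pairwise_cons.mp h1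
        obtain ⟨hd2, ht2⟩ := List.pairwise_cons.mp h2
        have hlen' : t1.length + t2.length + 1 ≤ n := by simp at hlen; omega
        simp only [List.map_cons]
        rw [mergeLoop]
        rcases lt_trichotomy d1 d2 with hlt | heq | hgt
        · -- d1 < d2 : d1 is missing from html
          have hnt2 : d1 ∉ t2 := fun hx => absurd (lt_trans hlt (hd2 _ hx)) (lt_irrefl d1)
          have hnm : d1 ∉ d2 :: t2 := by
            simp only [List.mem_cons]
            push_neg
            exact ⟨ne_of_lt hlt, hnt2⟩
          have hcon : (d2 :: t2).contains d1 = false := by simp [hnm]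
          rw [if_pos hlt]
          rw [show ((d2, g d2) :: t2.map (fun d => (d, g d))) = (d2 :: t2).map (fun d => (d, g d))
              from rfl]
          rw [ihn t1 (d2 :: t2) (by simp only [List.length_cons]; omega) ht1 h2]
          refine Prod.ext ?_ (Prod.ext ?_ (Prod.ext ?_ ?_))
          · simp only [List.filter_cons, hcon, Bool.false_eq_true, if_false]
          · simp only [List.filter_cons, hcon, Bool.false_eq_true, if_false]
          · show mo ++ _ = mo ++ _
            congr 1
            refine List.filter_congr ?_
            intro x hx
            have hgt' : d1 < x := by
              rcases List.mem_cons.mp hx with rfl | hx'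
              · exact hlt
              · exact lt_trans hlt (hd2 _ hx')
            simp [List.contains_cons, ne_of_gt hgt']
          · show mh ++ [d1] ++ _ = mh ++ _
            simp only [List.filter_cons, hcon, Bool.not_false, if_true, List.append_assoc,
              List.singleton_append]
        · -- equal dates: compare the two rows
          subst heq
          rw [if_neg (lt_irrefl d1), if_neg (lt_irrefl d1)]
          have hhead : ((d1 :: t2).contains d1) = true := by simp [List.contains_cons]
          have hnhead : (!(d1 :: t2).contains d1) = false := by simp [hhead]
          have hnhead1 : (!(d1 :: t1).contains d1) = false := by simp [List.contains_cons]
          have hcongr1 : ∀ x ∈ t1, ((d1 :: t2).contains x) = (t2.contains x) := by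
            intro x hx
            simp [List.contains_cons, ne_of_gt (hd1 _ hx)]
          have hcongr2 : ∀ x ∈ t2, (!(d1 :: t1).contains x) = (!t1.contains x) := by
            intro x hx
            simp [List.contains_cons, ne_of_gt (hd2 _ hx)]
          have hcongr1' : ∀ x ∈ t1, (!(d1 :: t2).contains x) = (!t2.contains x) := by
            intro x hx
            rw [hcongr1 x hx]
          cases hE : (rowDiffs (f d1) (g d1)).isEmpty
          · show (if (rowDiffs (f d1) (g d1)).isEmpty = true then _ else _) = _
            rw [hE, if_neg (by simp)]
            rw [ihn t1 t2 (by omega) ht1 ht2]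
            refine Prod.ext ?_ (Prod.ext ?_ (Prod.ext ?_ ?_))
            · simp only [List.filter_cons, hhead, if_true, List.countP_cons, hE,
                Bool.false_eq_true, if_false, List.filter_congr hcongr1, Nat.add_zero]
            · simp only [List.filter_cons, hhead, if_true, List.filterMap_cons, hE,
                Bool.false_eq_true, if_false, List.filter_congr hcongr1, List.append_assoc,
                List.singleton_append]
            · show mo ++ _ = mo ++ _
              simp only [List.filter_cons, hnhead1, Bool.false_eq_true, if_false,
                List.filter_congr hcongr2]
            · show mh ++ _ = mh ++ _
              simp only [List.filter_cons, hnhead, Bool.false_eq_true, if_false,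
                List.filter_congr hcongr1']
          · show (if (rowDiffs (f d1) (g d1)).isEmpty = true then _ else _) = _
            rw [hE, if_pos rfl]
            rw [ihn t1 t2 (by omega) ht1 ht2]
            refine Prod.ext ?_ (Prod.ext ?_ (Prod.ext ?_ ?_))
            · simp only [List.filter_cons, hhead, if_true, List.countP_cons, hE,
                List.filter_congr hcongr1]
              push_cast
              ring
            · simp only [List.filter_cons, hhead, if_true, List.filterMap_cons, hE,
                List.filter_congr hcongr1]
            · show mo ++ _ = mo ++ _
              simp only [List.filter_cons, hnhead1, Bool.false_eq_true, if_false,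
                List.filter_congr hcongr2]
            · show mh ++ _ = mh ++ _
              simp only [List.filter_cons, hnhead, Bool.false_eq_true, if_false,
                List.filter_congr hcongr1']
        · -- d2 < d1 : d2 is missing from oxps
          have hnt1 : d2 ∉ t1 := fun hx => absurd (lt_trans hgt (hd1 _ hx)) (lt_irrefl d2)
          have hnm : d2 ∉ d1 :: t1 := by
            simp only [List.mem_cons]
            push_neg
            exact ⟨ne_of_lt hgt, hnt1⟩
          have hcon : (d1 :: t1).contains d2 = false := by simp [hnm]
          rw [if_neg (asymm hgt), if_pos hgt]
          rw [show ((d1, f d1) :: t1.map (fun d => (d, f d))) = (d1 :: t1).map (fun d => (d, f d))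
              from rfl]
          rw [ihn (d1 :: t1) t2 (by simp only [List.length_cons]; omega) h1 ht2]
          have hcg : ∀ x ∈ d1 :: t1, ((d2 :: t2).contains x) = (t2.contains x) := by
            intro x hx
            have hgt' : d2 < x := by
              rcases List.mem_cons.mp hx with rfl | hx'
              · exact hgt
              · exact lt_trans hgt (hd1 _ hx')
            simp [List.contains_cons, ne_of_gt hgt']
          have hcg' : ∀ x ∈ d1 :: t1, (!(d2 :: t2).contains x) = (!t2.contains x) := by
            intro x hx
            rw [hcg x hx]
          refine Prod.ext ?_ (Prod.ext ?_ (Prod.ext ?_ ?_))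
          · rw [List.filter_congr hcg]
          · rw [List.filter_congr hcg]
          · show mo ++ [d2] ++ _ = mo ++ _
            simp only [List.filter_cons, hcon, Bool.not_false, if_true, List.append_assoc,
              List.singleton_append]
          · show mh ++ _ = mh ++ _
            rw [List.filter_congr hcg']

lemma merge_spec (f g : String → List (String × String)) (ks1 ks2 : List String)
    (h1 : ks1.Pairwise (· < ·)) (h2 : ks2.Pairwise (· < ·))
    (m : Int) (ms : List (String × List String)) (mo mh : List String) :
    mergeLoop (ks1.map (fun d => (d, f d))) (ks2.map (fun d => (d, g d))) m ms mo mh =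
      (m + (((ks1.filter (fun d => ks2.contains d)).countP
              (fun d => (rowDiffs (f d) (g d)).isEmpty) : Nat) : Int),
       ms ++ (ks1.filter (fun d => ks2.contains d)).filterMap
              (fun d => if (rowDiffs (f d) (g d)).isEmpty then none
                        else some (d, rowDiffs (f d) (g d))),
       mo ++ ks2.filter (fun d => !ks1.contains d),
       mh ++ ks1.filter (fun d => !ks2.contains d)) :=
  merge_spec_aux f g (ks1.length + ks2.length) ks1 ks2 le_rfl h1 h2 m ms mo mh

lemma common_mem (O H : PySem.Dict String (List (String × String))) (d : String) :
    d ∈ PySem.Set.inter (PySem.Set.ofList O.keys) H.keys ↔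
      (isCommon O H d = true ∧ d ∈ PySem.Set.union (PySem.Set.ofList O.keys) H.keys) := by
  simp [PySem.Set.mem_inter, PySem.Set.mem_union, PySem.Set.mem_ofList, isCommon,
    PySem.Dict.contains_iff_mem_keys]
  tauto

-- ===== VERDICT (by name: the statement is the Claim_ definition above) =====
set_option maxHeartbeats 2000000 in
theorem compare_totals_spec : Claim_equal_compare_totals := by
  intro oxps_rows html_rows _hdom _hpre
  unfold Spec_compare_totals
  simp only [compare_totals, compare_totals_alt]
  rw [outerA, latestTotals_eq oxps_rows, latestTotals_eq html_rows]
  have hko := keys_totalsOf_nodup oxps_rows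
  have hkh := keys_totalsOf_nodup html_rows
  set O := totalsOf oxps_rows with hO
  set H := totalsOf html_rows with hH
  rw [merge_spec (fun d => O.getD d []) (fun d => H.getD d [])
    (PySem.List.sorted O.keys (fun x => x) false) (PySem.List.sorted H.keys (fun x => x) false)
    (sorted_nodup_pairwise_lt _ hko) (sorted_nodup_pairwise_lt _ hkh)]
  have hU : (PySem.Set.union (PySem.Set.ofList O.keys) H.keys).Nodup :=
    PySem.Set.nodup_union _ _ (PySem.Set.nodup_ofList _)
  have hA1 := filter_sorted_eq (isCommon O H)
    (PySem.Set.union (PySem.Set.ofList O.keys) H.keys)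
    (PySem.Set.inter (PySem.Set.ofList O.keys) H.keys) hU
    (PySem.Set.nodup_inter _ _ (PySem.Set.nodup_ofList _)) (common_mem O H)
  have hB1 := filter_sorted_eq (fun d => (PySem.List.sorted H.keys (fun x => x) false).contains d)
    O.keys (PySem.Set.inter (PySem.Set.ofList O.keys) H.keys) hko
    (PySem.Set.nodup_inter _ _ (PySem.Set.nodup_ofList _))
    (by
      intro d
      simp [PySem.Set.mem_inter, PySem.Set.mem_ofList, PySem.List.mem_sorted]
      tauto)
  have hAmo := filter_sorted_eq (fun d => !O.contains d)
    (PySem.Set.union (PySem.Set.ofList O.keys) H.keys)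
    (PySem.Set.diff (PySem.Set.ofList H.keys) O.keys) hU
    (PySem.Set.nodup_diff _ _ (PySem.Set.nodup_ofList _))
    (by
      intro d
      simp [PySem.Set.mem_diff, PySem.Set.mem_union, PySem.Set.mem_ofList,
        contains_eq_false_iff]
      tauto)
  have hBmo := filter_sorted_eq (fun d => !(PySem.List.sorted O.keys (fun x => x) false).contains d)
    H.keys (PySem.Set.diff (PySem.Set.ofList H.keys) O.keys) hkh
    (PySem.Set.nodup_diff _ _ (PySem.Set.nodup_ofList _))
    (by
      intro d
      simp [PySem.Set.mem_diff, PySem.Set.mem_ofList, PySem.List.mem_sorted]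
      tauto)
  have hAmh := filter_sorted_eq (fun d => O.contains d && !H.contains d)
    (PySem.Set.union (PySem.Set.ofList O.keys) H.keys)
    (PySem.Set.diff (PySem.Set.ofList O.keys) H.keys) hU
    (PySem.Set.nodup_diff _ _ (PySem.Set.nodup_ofList _))
    (by
      intro d
      simp [PySem.Set.mem_diff, PySem.Set.mem_union, PySem.Set.mem_ofList,
        PySem.Dict.contains_iff_mem_keys, contains_eq_false_iff]
      tauto)
  have hBmh := filter_sorted_eq (fun d => !(PySem.List.sorted H.keys (fun x => x) false).contains d)
    O.keys (PySem.Set.diff (PySem.Set.ofList O.keys) H.keys) hko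
    (PySem.Set.nodup_diff _ _ (PySem.Set.nodup_ofList _))
    (by
      intro d
      simp [PySem.Set.mem_diff, PySem.Set.mem_ofList, PySem.List.mem_sorted]
      tauto)
  rw [hA1, hB1, hAmo, hBmo, hAmh, hBmh]
  refine Prod.ext ?_ (Prod.ext ?_ (Prod.ext rfl rfl))
  · show (0 : Int) + _ = (0 : Int) + _
    congr 2
    refine List.countP_congr ?_
    intro d _
    simp [isMatch, rowDiffs_eq]
  · show ([] : List (String × List String)) ++ _ = ([] : List (String × List String)) ++ _
    congr 1
    refine List.filterMap_congr ?_
    intro d _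
    simp [entryOf, rowDiffs_eq]
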